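-- pv_equiv track=rewrite | github.com/ahkjeflhkeuvha/programers | 프로그래머스/2/340212. ［PCCP 기출문제］ 2번 ／ 퍼즐 게임 챌린지/［PCCP 기출문제］ 2번 ／ 퍼즐 게임 챌린지.py | solution
-- ===== SOURCE A (Python) =====
-- def chk_level(diffs, times, limit, level):
--     tot_times = 0
--     n = len(diffs)
--
--     for i in range(n):
--         cur_diff = diffs[i]
--         cur_time = times[i]
--         prev_time = times[i - 1]
--
--         if cur_diff <= level:
--             tot_times += cur_time
--         else:
--             tot_times += (prev_time * (cur_diff - level)) + (cur_time * (cur_diff - level)) + cur_time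
--
--         if tot_times > limit:
--             return False
--
--     return True
--
-- def solution(diffs, times, limit):
--     answer = 0
--
--     max_num = max(diffs)
--     min_num = 1
--
--     while min_num <= max_num:
--         mid_num = (min_num + max_num) // 2
--
--         res = chk_level(diffs, times, limit, mid_num)
--
--         if res:
--             max_num = mid_num - 1
--         else:
--             min_num = mid_num + 1
--
--     return min_num
-- ===== SOURCE B (Python) =====
-- def solution(diffs, times, limit):
--     hardest = max(diffs)
--     prevs = times[-1:] + times[:-1]
--
--     def feasible(level):
--         run = 0
--         peaks = []
--         for d, t, p in zip(diffs, times, prevs):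
--             run += t if d <= level else (p + t) * (d - level) + t
--             peaks.append(run)
--         return max(peaks, default=0) <= limit
--
--     def search(lo, hi):
--         if lo > hi:
--             return lo
--         mid = (lo + hi) // 2
--         return search(lo, mid - 1) if feasible(mid) else search(mid + 1, hi)
--
--     return search(1, hardest)
-- ===== Notes on version B (the rewrite author's own statement) =====
-- stated objective: idiomatic
-- what changed: The feasibility check is rebuilt: costs come from zip over a rotated copy of times (no index arithmetic), with the factored formula (p+t)*(d-level)+t, and the early-exit running accumulator is replaced by building the full prefix-cost list and comparing its max against the limit; the interval-halving search is a recursion instead of a while loop (its probe sequence must be kept, since on inputs with negative times feasibility is non-monotone and the probe results are observable).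
-- outside the precondition, e.g. on solution([1, 5], [2], -26): A returns 6, B returns 6
import Mathlib
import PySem

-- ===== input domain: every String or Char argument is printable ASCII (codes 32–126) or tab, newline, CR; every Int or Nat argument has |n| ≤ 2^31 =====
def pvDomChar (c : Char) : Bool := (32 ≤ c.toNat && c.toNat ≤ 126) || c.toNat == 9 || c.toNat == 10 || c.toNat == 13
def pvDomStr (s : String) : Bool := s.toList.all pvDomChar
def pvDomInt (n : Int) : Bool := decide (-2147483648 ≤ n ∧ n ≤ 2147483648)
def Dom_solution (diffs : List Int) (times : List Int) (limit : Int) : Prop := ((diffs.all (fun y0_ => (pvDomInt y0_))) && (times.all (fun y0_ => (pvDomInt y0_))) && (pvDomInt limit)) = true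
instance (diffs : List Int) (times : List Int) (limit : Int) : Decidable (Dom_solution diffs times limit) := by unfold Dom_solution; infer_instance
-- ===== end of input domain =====

-- B rebuilds the feasibility check (zip over a rotated copy of times, full prefix-cost list compared by its max,
-- factored cost formula) and writes the interval-halving search as a recursion; same cost, no speed claim.


-- ===== PORT A =====
-- chk_level's index loop with early return False; out-of-range pyGetD defaults (IndexError) are excluded by Pre_solution
def chkGo (diffs times : List Int) (limit level : Int) (n i : Nat) (tot : Int) : Bool :=
  if i < n then
    let cur_diff := PySem.List.pyGetD diffs (i : Int) 0
    let cur_time := PySem.List.pyGetD times (i : Int) 0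
    let prev_time := PySem.List.pyGetD times ((i : Int) - 1) 0
    let tot' := if cur_diff ≤ level then tot + cur_time
      else tot + ((prev_time * (cur_diff - level)) + (cur_time * (cur_diff - level)) + cur_time)
    if limit < tot' then false
    else chkGo diffs times limit level n (i + 1) tot'
  else true
termination_by n - i

def chk_level (diffs times : List Int) (limit level : Int) : Bool :=
  chkGo diffs times limit level diffs.length 0 0

def solLoop (diffs times : List Int) (limit minNum maxNum : Int) : Int :=
  if h : minNum ≤ maxNum then
    let midNum := PySem.Int.floordiv (minNum + maxNum) 2
    if chk_level diffs times limit midNum then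
      solLoop diffs times limit minNum (midNum - 1)
    else
      solLoop diffs times limit (midNum + 1) maxNum
  else minNum
termination_by (maxNum + 1 - minNum).toNat
decreasing_by
  · have := PySem.Int.floordiv_two_mid_bounds h; omega
  · have := PySem.Int.floordiv_two_mid_bounds h; omega

def solution (diffs : List Int) (times : List Int) (limit : Int) : Int :=
  match PySem.List.max? diffs (fun y => y) with
  | some maxNum => solLoop diffs times limit 1 maxNum
  | none => 0   -- max([]) raises ValueError: excluded by Pre_solution

-- ===== PORT B =====
-- prevs = times[-1:] + times[:-1]
def prevsOf (times : List Int) : List Int :=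
  PySem.List.slice times (some (-1)) none ++ PySem.List.slice times none (some (-1))

-- t if d <= level else (p + t) * (d - level) + t
def costOf (level : Int) (x : Int × Int × Int) : Int :=
  if x.1 ≤ level then x.2.1 else (x.2.2 + x.2.1) * (x.1 - level) + x.2.1

def feasibleB (diffs times prevs : List Int) (limit level : Int) : Bool :=
  let st := (List.zip diffs (List.zip times prevs)).foldl
    (fun (st : Int × List Int) x =>
      let run := st.1 + costOf level x
      (run, st.2 ++ [run])) (0, [])
  PySem.List.maxD st.2 (fun y => y) 0 ≤ limit

def searchB (diffs times prevs : List Int) (limit lo hi : Int) : Int :=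
  if h : hi < lo then lo
  else
    let mid := PySem.Int.floordiv (lo + hi) 2
    if feasibleB diffs times prevs limit mid then
      searchB diffs times prevs limit lo (mid - 1)
    else
      searchB diffs times prevs limit (mid + 1) hi
termination_by (hi + 1 - lo).toNat
decreasing_by
  · have := PySem.Int.floordiv_two_mid_bounds (show lo ≤ hi by omega); omega
  · have := PySem.Int.floordiv_two_mid_bounds (show lo ≤ hi by omega); omega

def solution_alt (diffs : List Int) (times : List Int) (limit : Int) : Int :=
  match PySem.List.max? diffs (fun y => y) with
  | some hardest => searchB diffs times (prevsOf times) limit 1 hardest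
  | none => 0   -- max([]) raises ValueError: excluded by Pre_solution

-- ===== PRECONDITION & SPEC =====
-- Pre_ excludes empty diffs (max([]) raises ValueError) and inputs where times has fewer entries than diffs
-- while some diff is positive: there chk_level hits IndexError unless an early bail happens first, so whether
-- A raises at all depends on the accidental bail position.
def Pre_solution (diffs : List Int) (times : List Int) (limit : Int) : Prop :=
  diffs ≠ [] ∧ (diffs.length ≤ times.length ∨ ∀ d ∈ diffs, d ≤ 0)
instance (diffs : List Int) (times : List Int) (limit : Int) : Decidable (Pre_solution diffs times limit) := by
  unfold Pre_solution; infer_instance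

def pvWitness_solution : List Int × List Int × Int := ([1, 2], [1, 1], 10)

def Spec_solution (diffs : List Int) (times : List Int) (limit : Int) (out : Int) : Prop := out = solution_alt diffs times limit
instance (diffs : List Int) (times : List Int) (limit : Int) (out : Int) : Decidable (Spec_solution diffs times limit out) := by unfold Spec_solution; infer_instance

-- ===== CLAIM (what is proved, stated in full; the proofs are below) =====
def Claim_equal_solution : Prop := ∀ (diffs : List Int) (times : List Int) (limit : Int), Dom_solution diffs times limit → Pre_solution diffs times limit → Spec_solution diffs times limit (solution diffs times limit)

-- ===== LEMMAS AND PROOFS =====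

-- the per-puzzle cost list both programs walk through
def costsList (diffs times : List Int) (level : Int) : List Int :=
  (List.zip diffs (List.zip times (prevsOf times))).map (costOf level)

-- "every prefix sum starting from tot stays ≤ limit", in A's early-bail shape
def allPrefB (limit : Int) (tot : Int) : List Int → Bool
  | [] => true
  | c :: cs => if limit < tot + c then false else allPrefB limit (tot + c) cs

-- the list of running prefix sums B collects
def prefList (tot : Int) : List Int → List Int
  | [] => []
  | c :: cs => (tot + c) :: prefList (tot + c) cs

lemma length_prevsOf (times : List Int) (h : times ≠ []) : (prevsOf times).length = times.length := by
  have hl : 1 ≤ times.length := List.length_pos_of_ne_nil h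
  simp [prevsOf, PySem.List.slice_from_neg_one, PySem.List.slice_to_neg_one]

lemma length_costsList (diffs times : List Int) (level : Int)
    (hlen : diffs.length ≤ times.length) (ht : times ≠ []) :
    (costsList diffs times level).length = diffs.length := by
  simp [costsList, length_prevsOf times ht]
  omega

lemma getElem_prevsOf (times : List Int) (ht : times ≠ []) (i : Nat) (hi : i < times.length) :
    (prevsOf times)[i]'(by rw [length_prevsOf times ht]; exact hi) =
      if i = 0 then times.getLast ht else times[i - 1] := by
  have hl : 1 ≤ times.length := List.length_pos_of_ne_nil ht
  rcases i with _ | j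
  · simp [prevsOf, PySem.List.slice_from_neg_one, PySem.List.slice_to_neg_one]
    rw [List.getElem_append_left (by simp; omega)]
    simp [List.getLast_eq_getElem]
  · simp only [prevsOf, PySem.List.slice_from_neg_one, PySem.List.slice_to_neg_one,
      Nat.add_one_ne_zero, if_false]
    rw [List.getElem_append_right (by simp; omega)]
    have h1 : times.length - (times.length - 1) = 1 := by omega
    simp [List.getElem_dropLast, h1]

lemma getElem_costsList (diffs times : List Int) (level : Int) (i : Nat)
    (hlen : diffs.length ≤ times.length) (ht : times ≠ []) (hi : i < diffs.length) :
    (costsList diffs times level)[i]'(by rw [length_costsList diffs times level hlen ht]; exact hi) =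
      costOf level (diffs[i], times[i]'(by omega),
        if i = 0 then times.getLast ht else times[i - 1]'(by omega)) := by
  have hp := length_prevsOf times ht
  simp only [costsList, List.getElem_map, List.getElem_zip]
  rw [getElem_prevsOf times ht i (by omega)]

lemma chkGo_eq_allPref (diffs times : List Int) (limit level : Int)
    (hlen : diffs.length ≤ times.length) (ht : times ≠ []) :
    ∀ fuel i tot, diffs.length - i ≤ fuel →
      chkGo diffs times limit level diffs.length i tot =
        allPrefB limit tot ((costsList diffs times level).drop i) := by
  intro fuel
  induction fuel with
  | zero =>
    intro i tot hf
    have hi : ¬ i < diffs.length := by omega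
    rw [chkGo, if_neg hi, List.drop_eq_nil_of_le (by rw [length_costsList diffs times level hlen ht]; omega)]
    rfl
  | succ f ih =>
    intro i tot hf
    by_cases hi : i < diffs.length
    · have hcl : i < (costsList diffs times level).length := by
        rw [length_costsList diffs times level hlen ht]; exact hi
      rw [List.drop_eq_getElem_cons hcl]
      rw [chkGo, if_pos hi]
      rw [getElem_costsList diffs times level i hlen ht hi]
      have hdi : PySem.List.pyGetD diffs (i : Int) 0 = diffs[i] := by
        rw [PySem.List.pyGetD_natCast, List.getD_eq_getElem _ _ hi]
      have hti : PySem.List.pyGetD times (i : Int) 0 = times[i]'(by omega) := by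
        rw [PySem.List.pyGetD_natCast, List.getD_eq_getElem _ _ (by omega)]
      have hpi : PySem.List.pyGetD times ((i : Int) - 1) 0 =
          (if i = 0 then times.getLast ht else times[i - 1]'(by omega)) := by
        rcases i with _ | j
        · simpa using PySem.List.pyGetD_neg_one times 0 ht
        · have hc : ((j + 1 : Nat) : Int) - 1 = ((j : Nat) : Int) := by push_cast; ring
          rw [hc, PySem.List.pyGetD_natCast, List.getD_eq_getElem _ _ (by omega)]
          simp
      simp only [hdi, hti, hpi, costOf, allPrefB]
      by_cases hc : diffs[i] ≤ level
      · simp only [if_pos hc]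
        by_cases hlim : limit < tot + times[i]'(by omega)
        · rw [if_pos hlim, if_pos hlim]
        · rw [if_neg hlim, if_neg hlim]
          exact ih (i + 1) _ (by omega)
      · simp only [if_neg hc]
        have harith :
            tot + (((if i = 0 then times.getLast ht else times[i - 1]'(by omega)) * (diffs[i] - level)) +
              times[i]'(by omega) * (diffs[i] - level) + times[i]'(by omega)) =
            tot + (((if i = 0 then times.getLast ht else times[i - 1]'(by omega)) + times[i]'(by omega)) *
              (diffs[i] - level) + times[i]'(by omega)) := by ring
        rw [harith]
        by_cases hlim : limit < tot + (((if i = 0 then times.getLast ht else times[i - 1]'(by omega)) +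
            times[i]'(by omega)) * (diffs[i] - level) + times[i]'(by omega))
        · rw [if_pos hlim, if_pos hlim]
        · rw [if_neg hlim, if_neg hlim]
          exact ih (i + 1) _ (by omega)
    · rw [chkGo, if_neg hi, List.drop_eq_nil_of_le (by rw [length_costsList diffs times level hlen ht]; omega)]
      rfl

lemma foldl_peaks (level : Int) :
    ∀ (cs : List (Int × Int × Int)) (tot : Int) (acc : List Int),
      (cs.foldl (fun (st : Int × List Int) x =>
        let run := st.1 + costOf level x
        (run, st.2 ++ [run])) (tot, acc)).2 = acc ++ prefList tot (cs.map (costOf level)) := by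
  intro cs
  induction cs with
  | nil => intro tot acc; simp [prefList]
  | cons c cs ih => intro tot acc; simp [prefList, ih (tot + costOf level c) (acc ++ [tot + costOf level c])]

lemma allPrefB_iff (limit : Int) : ∀ (cs : List Int) (tot : Int),
    allPrefB limit tot cs = true ↔ ∀ x ∈ prefList tot cs, x ≤ limit := by
  intro cs
  induction cs with
  | nil => intro tot; simp [allPrefB, prefList]
  | cons c cs ih =>
    intro tot
    simp only [allPrefB, prefList, List.mem_cons]
    by_cases hlim : limit < tot + c
    · rw [if_pos hlim]
      simp only [Bool.false_eq_true, false_iff]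
      push Not
      exact ⟨tot + c, Or.inl rfl, hlim⟩
    · rw [if_neg hlim, ih (tot + c)]
      constructor
      · rintro h x (rfl | hx)
        · omega
        · exact h x hx
      · intro h x hx; exact h x (Or.inr hx)

lemma maxD_le_iff (xs : List Int) (hne : xs ≠ []) (limit : Int) :
    (PySem.List.maxD xs (fun y => y) 0 ≤ limit) ↔ ∀ x ∈ xs, x ≤ limit := by
  cases h : PySem.List.max? xs (fun y => y) with
  | none => exact absurd ((PySem.List.max?_eq_none_iff xs _).mp h) hne
  | some m =>
    have hmem := PySem.List.max?_mem h
    have hmax := PySem.List.max?_isMax h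
    have : PySem.List.maxD xs (fun y => y) 0 = m := by
      simp [PySem.List.maxD, h]
    rw [this]
    constructor
    · intro hm x hx; exact le_trans (hmax x hx) hm
    · intro hall; exact hall m hmem

lemma prefList_ne_nil (tot : Int) (cs : List Int) (h : cs ≠ []) : prefList tot cs ≠ [] := by
  cases cs with
  | nil => exact absurd rfl h
  | cons c cs => simp [prefList]

lemma feasibleB_eq_allPref (diffs times : List Int) (limit level : Int)
    (hlen : diffs.length ≤ times.length) (hd : diffs ≠ []) (ht : times ≠ []) :
    feasibleB diffs times (prevsOf times) limit level =
      allPrefB limit 0 (costsList diffs times level) := by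
  have hcs : costsList diffs times level ≠ [] := by
    have := length_costsList diffs times level hlen ht
    intro hc
    rw [hc] at this
    simp at this
    exact hd (List.eq_nil_of_length_eq_zero this.symm)
  have hfold := foldl_peaks level (List.zip diffs (List.zip times (prevsOf times))) 0 []
  simp only [feasibleB]
  rw [hfold]
  simp only [List.nil_append]
  have hpre : prefList 0 ((List.zip diffs (List.zip times (prevsOf times))).map (costOf level)) ≠ [] :=
    prefList_ne_nil 0 _ hcs
  rw [Bool.eq_iff_iff, decide_eq_true_iff, maxD_le_iff _ hpre limit,
    allPrefB_iff limit (costsList diffs times level) 0]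
  rfl

lemma chk_eq_feasible (diffs times : List Int) (limit : Int)
    (hlen : diffs.length ≤ times.length) (hd : diffs ≠ []) (ht : times ≠ []) (level : Int) :
    chk_level diffs times limit level = feasibleB diffs times (prevsOf times) limit level := by
  rw [feasibleB_eq_allPref diffs times limit level hlen hd ht]
  simpa [chk_level] using
    chkGo_eq_allPref diffs times limit level hlen ht diffs.length 0 0 (by omega)

lemma solLoop_eq_searchB (diffs times : List Int) (limit : Int)
    (hpt : ∀ L, chk_level diffs times limit L = feasibleB diffs times (prevsOf times) limit L) :
    ∀ (k : Nat) (lo hi : Int), (hi + 1 - lo).toNat ≤ k →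
      solLoop diffs times limit lo hi = searchB diffs times (prevsOf times) limit lo hi := by
  intro k
  induction k with
  | zero =>
    intro lo hi hk
    rw [solLoop, searchB]
    rw [dif_neg (by omega), dif_pos (by omega)]
  | succ f ih =>
    intro lo hi hk
    rw [solLoop, searchB]
    by_cases h : lo ≤ hi
    · rw [dif_pos h, dif_neg (by omega)]
      have hmid := PySem.Int.floordiv_two_mid_bounds h
      simp only [hpt]
      split
      · exact ih lo (PySem.Int.floordiv (lo + hi) 2 - 1) (by omega)
      · exact ih (PySem.Int.floordiv (lo + hi) 2 + 1) hi (by omega)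
    · rw [dif_neg h, dif_pos (by omega)]

-- ===== VERDICT (by name: the statement is the Claim_ definition above) =====
theorem solution_spec : Claim_equal_solution := by
  intro diffs times limit _hdom hpre
  unfold Spec_solution
  obtain ⟨hd, hrest⟩ := hpre
  unfold solution solution_alt
  cases hmax : PySem.List.max? diffs (fun y => y) with
  | none => rfl
  | some m =>
    show solLoop diffs times limit 1 m = searchB diffs times (prevsOf times) limit 1 m
    rcases hrest with hlen | hneg
    · have ht : times ≠ [] := by
        intro h
        rw [h] at hlen
        simp at hlen
        exact hd hlen
      exact solLoop_eq_searchB diffs times limit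
        (chk_eq_feasible diffs times limit hlen hd ht) (m + 1 - 1).toNat 1 m (by omega)
    · have hm : m ≤ 0 := hneg m (PySem.List.max?_mem hmax)
      rw [solLoop, searchB]
      rw [dif_neg (by omega), dif_pos (by omega)]
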